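-- pv_equiv track=rewrite | github.com/Jjschwartz/NetworkAttackSimulator | cyber_attack_simulator/envs/loader.py | is_valid_firewall_setting
-- ===== SOURCE A (Python) =====
-- def is_valid_firewall_setting(f, service_exploits):
--     """
--     Check that a given firewall setting is valid given the list of service exploits available
--     """
--     if type(f) != list:
--         return False
--     for service in f:
--         if service not in service_exploits:
--             return False
--     for i, x in enumerate(f):
--         for j, y in enumerate(f):
--             if i != j and x == y:
--                 return False
--     return True
-- ===== SOURCE B (Python) =====
-- def is_valid_firewall_setting(f, service_exploits):
--     if type(f) != list:
--         return False
--     seen = []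
--     for service in f:
--         if service not in service_exploits:
--             return False
--         if service in seen:
--             return False
--         seen.append(service)
--     return True
-- ===== Notes on version B (the rewrite author's own statement) =====
-- stated objective: simpler
-- what changed: Merges A's separate membership loop and nested O(n^2) duplicate-detection loops into one pass maintaining a 'seen' list (kept as a list so equality-based membership matches A even on unhashable elements).
import Mathlib
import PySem

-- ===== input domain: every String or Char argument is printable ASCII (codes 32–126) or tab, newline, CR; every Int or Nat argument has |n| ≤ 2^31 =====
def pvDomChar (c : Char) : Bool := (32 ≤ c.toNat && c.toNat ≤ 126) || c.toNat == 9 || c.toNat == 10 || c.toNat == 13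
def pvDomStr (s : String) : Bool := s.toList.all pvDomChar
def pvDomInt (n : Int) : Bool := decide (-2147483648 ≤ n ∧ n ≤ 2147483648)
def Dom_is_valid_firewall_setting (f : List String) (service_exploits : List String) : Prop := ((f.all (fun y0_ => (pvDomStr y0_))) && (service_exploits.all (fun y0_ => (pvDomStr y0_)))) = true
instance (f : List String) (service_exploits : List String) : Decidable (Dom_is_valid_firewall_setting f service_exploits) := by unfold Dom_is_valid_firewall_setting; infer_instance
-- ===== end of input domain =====

-- B merges A's membership loop and nested duplicate-detection loops into one pass
-- with a 'seen' accumulator (objective: simpler). The 'type(f) != list' guard is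
-- always satisfied under the type convention (f : List String).

-- ===== PORT A =====
-- first loop: for service in f: if service not in service_exploits: return False
def pvAMem (f : List String) (se : List String) : Bool :=
  match f with
  | [] => true
  | s :: rest => if s ∈ se then pvAMem rest se else false

-- inner loop: for j, y in enumerate(f): if i != j and x == y: return False (true = early return hit)
def pvAInner (i : Int) (x : String) (ps : List (Int × String)) : Bool :=
  match ps with
  | [] => false
  | (j, y) :: rest => if i ≠ j ∧ x = y then true else pvAInner i x rest

-- outer loop: for i, x in enumerate(f): … (true = some early return hit)
def pvAOuter (all : List (Int × String)) (ps : List (Int × String)) : Bool :=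
  match ps with
  | [] => false
  | (i, x) :: rest => if pvAInner i x all then true else pvAOuter all rest

def is_valid_firewall_setting (f : List String) (service_exploits : List String) : Bool :=
  if pvAMem f service_exploits then
    if pvAOuter (PySem.List.enumerate f) (PySem.List.enumerate f) then false else true
  else false

-- ===== PORT B =====
-- single pass with a 'seen' accumulator (seen.append(service) = seen ++ [service])
def pvBLoop (se : List String) (f : List String) (seen : List String) : Bool :=
  match f with
  | [] => true
  | s :: rest =>
    if s ∉ se then false
    else if s ∈ seen then false
    else pvBLoop se rest (seen ++ [s])

def is_valid_firewall_setting_alt (f : List String) (service_exploits : List String) : Bool :=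
  pvBLoop service_exploits f []

-- ===== PRECONDITION & SPEC =====
def Spec_is_valid_firewall_setting (f : List String) (service_exploits : List String) (out : Bool) : Prop := out = is_valid_firewall_setting_alt f service_exploits
instance (f : List String) (service_exploits : List String) (out : Bool) : Decidable (Spec_is_valid_firewall_setting f service_exploits out) := by unfold Spec_is_valid_firewall_setting; infer_instance

-- ===== CLAIM (what is proved, stated in full; the proofs are below) =====
def Claim_equal_is_valid_firewall_setting : Prop := ∀ (f : List String) (service_exploits : List String), Dom_is_valid_firewall_setting f service_exploits → Spec_is_valid_firewall_setting f service_exploits (is_valid_firewall_setting f service_exploits)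

-- ===== LEMMAS AND PROOFS =====

theorem pvAMem_iff (f se : List String) : pvAMem f se = true ↔ ∀ s ∈ f, s ∈ se := by
  induction f with
  | nil => simp [pvAMem]
  | cons s rest ih =>
    simp only [pvAMem]
    by_cases h : s ∈ se <;> simp [h, ih]

theorem pvAInner_iff (i : Int) (x : String) (ps : List (Int × String)) :
    pvAInner i x ps = true ↔ ∃ p ∈ ps, i ≠ p.1 ∧ x = p.2 := by
  induction ps with
  | nil => simp [pvAInner]
  | cons p rest ih =>
    obtain ⟨j, y⟩ := p
    simp only [pvAInner]
    by_cases h : i ≠ j ∧ x = y <;> simp [h, ih]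

theorem pvAOuter_iff (all ps : List (Int × String)) :
    pvAOuter all ps = true ↔ ∃ p ∈ ps, pvAInner p.1 p.2 all = true := by
  induction ps with
  | nil => simp [pvAOuter]
  | cons p rest ih =>
    obtain ⟨i, x⟩ := p
    simp only [pvAOuter]
    by_cases h : pvAInner i x all = true <;> simp [h, ih]

theorem pvADup_iff (f : List String) :
    pvAOuter (PySem.List.enumerate f) (PySem.List.enumerate f) = true ↔ ¬ f.Nodup := by
  rw [pvAOuter_iff]
  constructor
  · rintro ⟨p, hp, hin⟩ hnd
    rw [pvAInner_iff] at hin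
    obtain ⟨q, hq, hne, heq⟩ := hin
    rw [PySem.List.mem_enumerate_iff] at hp hq
    obtain ⟨k, hk, rfl⟩ := hp
    obtain ⟨l, hl, rfl⟩ := hq
    simp only at hne heq
    exact hne (by
      have : k = l := (List.Nodup.getElem_inj_iff hnd).mp heq
      omega)
  · intro hnd
    rw [List.nodup_iff_injective_get] at hnd
    simp only [Function.Injective, not_forall] at hnd
    obtain ⟨a, b, hget, hab⟩ := hnd
    refine ⟨(0 + (a : Nat), f[(a : Nat)]), ?_, ?_⟩
    · rw [PySem.List.mem_enumerate_iff]; exact ⟨a, a.isLt, rfl⟩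
    · rw [pvAInner_iff]
      refine ⟨(0 + (b : Nat), f[(b : Nat)]), ?_, ?_, ?_⟩
      · rw [PySem.List.mem_enumerate_iff]; exact ⟨b, b.isLt, rfl⟩
      · simp only
        intro h
        exact hab (Fin.ext (by omega))
      · simpa [List.get_eq_getElem] using hget

theorem pvBLoop_iff (se : List String) (f : List String) (seen : List String) :
    pvBLoop se f seen = true ↔
      (∀ s ∈ f, s ∈ se) ∧ (∀ s ∈ f, s ∉ seen) ∧ f.Nodup := by
  induction f generalizing seen with
  | nil => simp [pvBLoop]
  | cons s rest ih =>
    simp only [pvBLoop]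
    by_cases h1 : s ∈ se
    · by_cases h2 : s ∈ seen
      · simp [h1, h2]
      · rw [if_neg (not_not_intro h1), if_neg h2, ih]
        constructor
        · rintro ⟨ha, hb, hc⟩
          refine ⟨?_, ?_, ?_⟩
          · intro t ht
            rcases List.mem_cons.mp ht with rfl | ht'
            · exact h1
            · exact ha t ht'
          · intro t ht
            rcases List.mem_cons.mp ht with rfl | ht'
            · exact h2
            · exact fun hm => hb t ht' (List.mem_append.mpr (Or.inl hm))
          · exact List.nodup_cons.mpr
              ⟨fun hsr => hb s hsr (List.mem_append.mpr (Or.inr (List.mem_singleton.mpr rfl))), hc⟩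
        · rintro ⟨ha, hb, hc⟩
          have hns := (List.nodup_cons.mp hc).1
          refine ⟨fun t ht => ha t (List.mem_cons_of_mem _ ht), ?_, (List.nodup_cons.mp hc).2⟩
          intro t ht hm
          rcases List.mem_append.mp hm with hm' | hm'
          · exact hb t (List.mem_cons_of_mem _ ht) hm'
          · have hts := List.mem_singleton.mp hm'
            subst hts
            exact hns ht
    · simp [h1]

theorem pvA_iff (f se : List String) :
    is_valid_firewall_setting f se = true ↔ (∀ s ∈ f, s ∈ se) ∧ f.Nodup := by
  unfold is_valid_firewall_setting
  by_cases h1 : pvAMem f se = true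
  · by_cases h2 : pvAOuter (PySem.List.enumerate f) (PySem.List.enumerate f) = true
    · have hd := (pvADup_iff f).mp h2
      rw [if_pos h1, if_pos h2]
      simp only [Bool.false_eq_true, false_iff, not_and]
      exact fun _ => hd
    · have hd := not_not.mp ((not_iff_not.mpr (pvADup_iff f)).mp h2)
      have hm := (pvAMem_iff f se).mp h1
      rw [if_pos h1, if_neg h2]
      simpa using ⟨hm, hd⟩
  · have hm := (not_iff_not.mpr (pvAMem_iff f se)).mp h1
    rw [if_neg h1]
    simp only [Bool.false_eq_true, false_iff, not_and]
    exact fun hall => absurd hall hm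

-- ===== VERDICT (by name: the statement is the Claim_ definition above) =====
theorem is_valid_firewall_setting_spec : Claim_equal_is_valid_firewall_setting := by
  intro f se _
  unfold Spec_is_valid_firewall_setting is_valid_firewall_setting_alt
  rw [Bool.eq_iff_iff, pvA_iff, pvBLoop_iff]
  simp
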